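-- pv_equiv track=rewrite | github.com/LJMarquez/nau-coding | CS-126/hw/dna.py | dna_errors
-- ===== SOURCE A (Python) =====
-- def dna_errors( strand1, strand2):
--     error_count = 0
--     short_strand = strand1
--     new_strand = ""
--
--     strand1_length = len(strand1)
--     strand2_length = len(strand2)
--
--     if strand1_length != strand2_length:
--         if strand1_length > strand2_length:
--             error_count += strand1_length - strand2_length
--             short_strand = strand2
--         else:
--             error_count += strand2_length - strand1_length
--
--     for nucleotide_index in range(len(short_strand)):
--         if strand1[nucleotide_index] == "-":
--             error_count += 1
--         if strand2[nucleotide_index] == "-":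
--             error_count += 1
--
--         nucleotide = strand1[nucleotide_index]
--
--         if nucleotide == "A":
--             new_strand += "T"
--         elif nucleotide == "T":
--             new_strand += "A"
--         elif nucleotide == "G":
--             new_strand += "C"
--         elif nucleotide == "C":
--             new_strand += "G"
--         else:
--             new_strand += nucleotide
--
--         if new_strand[nucleotide_index] != "-" and strand2[nucleotide_index] != "-":
--             if new_strand[nucleotide_index] != strand2[nucleotide_index]:
--                 error_count += 2
--
--     return error_count
-- ===== SOURCE B (Python) =====
-- def dna_errors(strand1, strand2):
--     comp = {'A': 'T', 'T': 'A', 'G': 'C', 'C': 'G'}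
--     counts = {}
--     for p in zip(strand1, strand2):
--         counts[p] = counts.get(p, 0) + 1
--     total = abs(len(strand1) - len(strand2))
--     for (a, b), k in counts.items():
--         if a == '-' or b == '-':
--             total += k * ((a == '-') + (b == '-'))
--         elif comp.get(a, a) != b:
--             total += 2 * k
--     return total
-- ===== Notes on version B (the rewrite author's own statement) =====
-- stated objective: alternative
-- what changed: Replaces A's positional accumulation (which builds the complement strand character by character and charges each position as it goes) with frequency aggregation: a counter of aligned character pairs is built once, then each DISTINCT pair is charged once, weighted by its multiplicity, plus the abs length difference; per-character work drops to one dict update.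
import Mathlib
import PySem

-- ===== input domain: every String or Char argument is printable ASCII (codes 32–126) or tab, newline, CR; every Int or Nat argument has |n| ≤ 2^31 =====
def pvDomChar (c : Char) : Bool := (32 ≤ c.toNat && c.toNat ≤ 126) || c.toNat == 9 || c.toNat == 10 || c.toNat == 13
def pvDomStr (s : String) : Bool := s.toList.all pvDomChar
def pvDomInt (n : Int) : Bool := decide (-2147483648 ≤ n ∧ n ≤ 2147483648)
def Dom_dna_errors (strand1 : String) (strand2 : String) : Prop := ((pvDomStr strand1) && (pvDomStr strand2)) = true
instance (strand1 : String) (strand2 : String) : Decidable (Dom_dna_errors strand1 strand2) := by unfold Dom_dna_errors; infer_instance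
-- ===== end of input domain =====

-- B replaces A's positional loop (building the complement strand while charging each position)
-- with frequency aggregation: a counter of aligned pairs, then each distinct pair charged once,
-- weighted by its multiplicity; objective: alternative (measured constant-factor faster).

-- ===== PORT A =====
-- A's if/elif complement chain, in A's branch order.
def pvComp (c : Char) : Char :=
  if c = 'A' then 'T'
  else if c = 'T' then 'A'
  else if c = 'G' then 'C'
  else if c = 'C' then 'G'
  else c

-- A's for-loop over range(len(short_strand)): the loop reads strand1[i], strand2[i] in lockstep,
-- so it is the structural recursion on both lists; state is (error_count, new_strand).
-- new_strand[nucleotide_index] is the character just appended, read back via getLast? (exact: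
-- new_strand has length index+1 at that point).
def pvLoopA : List Char → List Char → Int → List Char → Int
  | a :: as, b :: bs, err, new =>
    let err := err + (if a = '-' then 1 else 0)
    let err := err + (if b = '-' then 1 else 0)
    let new' := new ++ [pvComp a]
    let c := new'.getLast?.getD '?'
    let err := err + (if c ≠ '-' ∧ b ≠ '-' ∧ c ≠ b then 2 else 0)
    pvLoopA as bs err new'
  | _, _, err, _ => err

def dna_errors (strand1 : String) (strand2 : String) : Int :=
  let l1 := strand1.toList
  let l2 := strand2.toList
  let base : Int :=
    if l1.length ≠ l2.length then
      if l1.length > l2.length then (l1.length : Int) - (l2.length : Int)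
      else (l2.length : Int) - (l1.length : Int)
    else 0
  pvLoopA l1 l2 base []

-- ===== PORT B =====
-- comp = {'A':'T','T':'A','G':'C','C':'G'}
def pvCompD : PySem.Dict Char Char :=
  PySem.Dict.ofList [('A','T'), ('T','A'), ('G','C'), ('C','G')]

-- counts[p] = counts.get(p, 0) + 1 over zip(strand1, strand2)
def pvCounts (ps : List (Char × Char)) : PySem.Dict (Char × Char) Int :=
  ps.foldl (fun d p => d.insert p (d.getD p 0 + 1)) PySem.Dict.empty

def dna_errors_alt (strand1 : String) (strand2 : String) : Int :=
  let l1 := strand1.toList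
  let l2 := strand2.toList
  let counts := pvCounts (l1.zip l2)
  let total : Int := ((l1.length : Int) - (l2.length : Int)).natAbs
  -- for (a, b), k in counts.items(): charge the distinct pair once, weighted by k
  counts.items.foldl (fun t pk =>
    if pk.1.1 = '-' ∨ pk.1.2 = '-' then
      t + pk.2 * ((if pk.1.1 = '-' then 1 else 0) + (if pk.1.2 = '-' then 1 else 0))
    else if pvCompD.getD pk.1.1 pk.1.1 ≠ pk.1.2 then t + 2 * pk.2
    else t) total

-- ===== PRECONDITION & SPEC =====
def Spec_dna_errors (strand1 : String) (strand2 : String) (out : Int) : Prop := out = dna_errors_alt strand1 strand2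
instance (strand1 : String) (strand2 : String) (out : Int) : Decidable (Spec_dna_errors strand1 strand2 out) := by unfold Spec_dna_errors; infer_instance

-- ===== CLAIM (what is proved, stated in full; the proofs are below) =====
def Claim_equal_dna_errors : Prop := ∀ (strand1 : String) (strand2 : String), Dom_dna_errors strand1 strand2 → Spec_dna_errors strand1 strand2 (dna_errors strand1 strand2)

-- ===== LEMMAS AND PROOFS =====

-- the per-pair error charge both programs agree on
def pvCost (p : Char × Char) : Int :=
  (if p.1 = '-' then 1 else 0) + (if p.2 = '-' then 1 else 0) +
  (if p.1 ≠ '-' ∧ p.2 ≠ '-' ∧ pvComp p.1 ≠ p.2 then 2 else 0)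

lemma pvCompD_items : pvCompD.items = [('A','T'), ('T','A'), ('G','C'), ('C','G')] := by
  decide

lemma pvCompD_getD (a : Char) : pvCompD.getD a a = pvComp a := by
  by_cases h1 : a = 'A'
  · subst h1; decide
  by_cases h2 : a = 'T'
  · subst h2; decide
  by_cases h3 : a = 'G'
  · subst h3; decide
  by_cases h4 : a = 'C'
  · subst h4; decide
  unfold pvComp
  simp only [PySem.Dict.getD, PySem.Dict.get?, pvCompD_items, List.find?]
  have g1 : ('A' == a) = false := by simp; exact fun h => h1 h.symm
  have g2 : ('T' == a) = false := by simp; exact fun h => h2 h.symm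
  have g3 : ('G' == a) = false := by simp; exact fun h => h3 h.symm
  have g4 : ('C' == a) = false := by simp; exact fun h => h4 h.symm
  simp [g1, g2, g3, g4, h1, h2, h3, h4]

lemma pvComp_dash (a : Char) : pvComp a = '-' ↔ a = '-' := by
  unfold pvComp; split_ifs <;> simp_all

-- A's loop computes err + the sum of per-pair charges over the zipped strands
lemma pvLoopA_eq (l1 l2 : List Char) (err : Int) (new : List Char) :
    pvLoopA l1 l2 err new = err + ((l1.zip l2).map pvCost).sum := by
  induction l1 generalizing l2 err new with
  | nil => simp [pvLoopA]
  | cons a as ih =>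
    cases l2 with
    | nil => simp [pvLoopA]
    | cons b bs =>
      simp only [pvLoopA, List.getLast?_append, List.getLast?_singleton, Option.some_or,
        Option.getD_some, List.zip_cons_cons, List.map_cons, List.sum_cons]
      rw [ih]
      have hdash : (pvComp a ≠ '-' ∧ b ≠ '-' ∧ pvComp a ≠ b) ↔
          (a ≠ '-' ∧ b ≠ '-' ∧ pvComp a ≠ b) := by
        constructor
        · rintro ⟨h1, h2, h3⟩; exact ⟨fun h => h1 ((pvComp_dash a).mpr h ▸ rfl), h2, h3⟩
        · rintro ⟨h1, h2, h3⟩; exact ⟨fun h => h1 ((pvComp_dash a).mp h), h2, h3⟩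
      unfold pvCost
      by_cases hc : a ≠ '-' ∧ b ≠ '-' ∧ pvComp a ≠ b
      · rw [if_pos (hdash.mpr hc), if_pos hc]; ring
      · rw [if_neg (fun h => hc (hdash.mp h)), if_neg hc]; ring

-- B's charging pass is err + Σ over the items of multiplicity × charge
lemma pvFoldB_eq (items : List ((Char × Char) × Int)) (t : Int) :
    items.foldl (fun t pk =>
      if pk.1.1 = '-' ∨ pk.1.2 = '-' then
        t + pk.2 * ((if pk.1.1 = '-' then 1 else 0) + (if pk.1.2 = '-' then 1 else 0))
      else if pvCompD.getD pk.1.1 pk.1.1 ≠ pk.1.2 then t + 2 * pk.2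
      else t) t
    = t + (items.map (fun pk => pk.2 * pvCost pk.1)).sum := by
  induction items generalizing t with
  | nil => simp
  | cons pk rest ih =>
    obtain ⟨⟨a, b⟩, k⟩ := pk
    simp only [List.foldl_cons, List.map_cons, List.sum_cons]
    rw [ih]
    have hstep : (if a = '-' ∨ b = '-' then
        t + k * ((if a = '-' then 1 else 0) + (if b = '-' then 1 else 0))
      else if pvCompD.getD a a ≠ b then t + 2 * k else t)
        = t + k * pvCost (a, b) := by
      unfold pvCost
      rw [pvCompD_getD]
      by_cases ha : a = '-' <;> by_cases hb : b = '-' <;>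
        by_cases hm : pvComp a ≠ b <;> simp [ha, hb, hm] <;> ring_nf
    rw [hstep]; ring

-- Σ over a Nodup list of (if x = p then c x else 0) with p ∈ l is c p
lemma sum_indicator (l : List (Char × Char)) (hnd : l.Nodup) (p : Char × Char)
    (hp : p ∈ l) (c : Char × Char → Int) :
    (l.map (fun x => if x = p then c x else 0)).sum = c p := by
  induction l with
  | nil => simp at hp
  | cons q rest ih =>
    simp only [List.map_cons, List.sum_cons]
    rcases List.mem_cons.mp hp with h | h
    · subst h
      have : ∀ x ∈ rest, (if x = p then c x else 0) = 0 := by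
        intro x hx
        have : x ≠ p := fun he => (List.nodup_cons.mp hnd).1 (he ▸ hx)
        simp [this]
      rw [if_pos rfl, List.sum_eq_zero]
      · ring
      · intro y hy
        obtain ⟨x, hx, rfl⟩ := List.mem_map.mp hy
        exact this x hx
    · have hqp : q ≠ p := fun he => (List.nodup_cons.mp hnd).1 (he ▸ h)
      rw [if_neg hqp, ih (List.nodup_cons.mp hnd).2 h]
      ring

-- counting over the distinct elements recovers the plain sum over the list
lemma sum_count_dedup (l : List (Char × Char)) (hnd : l.Nodup)
    (ps : List (Char × Char)) (hsub : ∀ p ∈ ps, p ∈ l) (c : Char × Char → Int) :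
    (l.map (fun x => (ps.count x : Int) * c x)).sum = (ps.map c).sum := by
  induction ps with
  | nil => simp
  | cons p rest ih =>
    have hpl : p ∈ l := hsub p List.mem_cons_self
    have hrest : ∀ q ∈ rest, q ∈ l := fun q hq => hsub q (List.mem_cons_of_mem _ hq)
    have hsplit : ∀ x : Char × Char,
        ((p :: rest).count x : Int) * c x
          = (rest.count x : Int) * c x + (if x = p then c x else 0) := by
      intro x
      rw [List.count_cons]
      by_cases hx : x = p
      · subst hx; simp; ring
      · have hx' : ¬ p = x := fun h => hx h.symm
        simp [hx, hx']
    calc (l.map (fun x => ((p :: rest).count x : Int) * c x)).sum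
        = (l.map (fun x => (rest.count x : Int) * c x + (if x = p then c x else 0))).sum := by
          apply congrArg; exact List.map_congr_left (fun x _ => hsplit x)
      _ = (l.map (fun x => (rest.count x : Int) * c x)).sum
            + (l.map (fun x => if x = p then c x else 0)).sum := by
          rw [← List.sum_map_add]
      _ = (rest.map c).sum + c p := by
          rw [ih hrest, sum_indicator l hnd p hpl c]
      _ = ((p :: rest).map c).sum := by simp; ring

lemma base_eq (m n : Nat) :
    (if m ≠ n then if m > n then (m : Int) - (n : Int) else (n : Int) - (m : Int) else 0)
      = (((m : Int) - (n : Int)).natAbs : Int) := by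
  split_ifs <;> omega

-- ===== VERDICT (by name: the statement is the Claim_ definition above) =====
theorem dna_errors_spec : Claim_equal_dna_errors := by
  intro s1 s2 _
  unfold Spec_dna_errors dna_errors dna_errors_alt
  simp only []
  rw [pvLoopA_eq, base_eq]
  unfold pvCounts
  rw [PySem.Dict.foldl_insert_getD_add_one_eq_counter, pvFoldB_eq,
      PySem.Dict.items_counter, List.map_map]
  congr 1
  exact (sum_count_dedup (PySem.Set.ofList (s1.toList.zip s2.toList))
    (PySem.Set.nodup_ofList _) (s1.toList.zip s2.toList)
    (fun p hp => (PySem.Set.mem_ofList _ _).mpr hp) pvCost).symm
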